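-- pv_equiv track=rewrite | github.com/jeffbrianho/python_110 | py119_written_practice/work_space.py | find_first_prime
-- ===== SOURCE A (Python) =====
-- def find_first_prime(nested_list):
--
--     def is_prime(num):
--         if num < 2:
--             return False
--
--         return all([num % div for div in range(2, num)])
--
--     for sub_list in nested_list:
--         for element in sub_list:
--             if is_prime(element):
--                 return element
--             else:
--                 continue
--     return -1
-- ===== SOURCE B (Python) =====
-- def is_prime(num):
--     if num < 2:
--         return False
--     d = 2
--     while d * d <= num:
--         if num % d == 0:
--             return False
--         d += 1
--     return True
--
--
-- def find_first_prime(nested_list):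
--     return next((element for sub_list in nested_list for element in sub_list
--                  if is_prime(element)), -1)
-- ===== Notes on version B (the rewrite author's own statement) =====
-- stated objective: alternative
-- what changed: primality is decided by trial division only for divisors d with d*d <= num and with early exit, instead of materialising and testing the full list of remainders for every divisor below num, and the nested search loops become a single generator/next scan over the flattened sequence; intended as faster per element, but a timing run measured only 1.22x at its largest size (an early prime short-circuits both)
import Mathlib
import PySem

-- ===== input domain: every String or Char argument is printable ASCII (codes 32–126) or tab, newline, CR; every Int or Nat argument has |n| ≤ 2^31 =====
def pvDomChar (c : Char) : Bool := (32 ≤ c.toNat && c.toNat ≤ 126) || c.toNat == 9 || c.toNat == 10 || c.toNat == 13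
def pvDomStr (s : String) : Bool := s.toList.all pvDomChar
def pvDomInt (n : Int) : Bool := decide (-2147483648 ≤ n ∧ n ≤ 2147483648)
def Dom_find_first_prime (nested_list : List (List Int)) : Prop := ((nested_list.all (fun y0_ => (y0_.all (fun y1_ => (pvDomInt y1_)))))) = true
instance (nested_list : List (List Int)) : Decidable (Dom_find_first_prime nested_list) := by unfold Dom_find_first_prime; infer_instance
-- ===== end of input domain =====

-- B tests primality by trial division only over divisors d with d*d <= num (early exit) and
-- searches the flattened sequence with find?; return value proved identical on the domain.

-- ===== PORT A =====
-- is_prime: num < 2 → False, else all([num % div for div in range(2, num)])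
def pvIsPrimeA (num : Int) : Bool :=
  if num < 2 then false
  else ((PySem.List.pyRange 2 num 1).map (fun dv => PySem.Int.mod num dv)).all (fun r => r ≠ 0)

-- inner 'for element in sub_list: if is_prime(element): return element'
def pvInnerA : List Int → Option Int
  | [] => none
  | x :: xs => if pvIsPrimeA x then some x else pvInnerA xs

-- outer 'for sub_list in nested_list: …; return -1'
def find_first_prime (nested_list : List (List Int)) : Int :=
  match nested_list with
  | [] => -1
  | s :: rest =>
    match pvInnerA s with
    | some x => x
    | none => find_first_prime rest

-- ===== PORT B =====
-- 'while d * d <= num: if num % d == 0: return False; d += 1'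
def pvTrial (num d : Int) : Bool :=
  if _h : d * d ≤ num then
    if PySem.Int.mod num d = 0 then false else pvTrial num (d + 1)
  else true
termination_by (num + 1 - d).toNat
decreasing_by
  have hd : d ≤ d * d := by nlinarith [mul_self_nonneg (d - 1), mul_self_nonneg d]
  have hdn : d ≤ num := le_trans hd _h
  omega

def pvIsPrimeB (num : Int) : Bool :=
  if num < 2 then false else pvTrial num 2

-- next((element for sub_list in nested_list for element in sub_list if is_prime(element)), -1)
def find_first_prime_alt (nested_list : List (List Int)) : Int :=
  match (nested_list.flatMap (fun s => s)).find? pvIsPrimeB with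
  | some x => x
  | none => -1

-- ===== PRECONDITION & SPEC =====
def Spec_find_first_prime (nested_list : List (List Int)) (out : Int) : Prop := out = find_first_prime_alt nested_list
instance (nested_list : List (List Int)) (out : Int) : Decidable (Spec_find_first_prime nested_list out) := by unfold Spec_find_first_prime; infer_instance

-- ===== CLAIM (what is proved, stated in full; the proofs are below) =====
def Claim_equal_find_first_prime : Prop := ∀ (nested_list : List (List Int)), Dom_find_first_prime nested_list → Spec_find_first_prime nested_list (find_first_prime nested_list)

-- ===== LEMMAS AND PROOFS =====

lemma pvTrial_iff (num : Int) : ∀ d0 : Int, 0 ≤ d0 →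
    (pvTrial num d0 = true ↔ ∀ d, d0 ≤ d → d * d ≤ num → PySem.Int.mod num d ≠ 0) := by
  intro d0
  induction d0 using pvTrial.induct (num := num) with
  | case1 x hle hmod =>
    intro _
    have hT : pvTrial num x = false := by rw [pvTrial]; simp [hle, hmod]
    rw [hT]
    simp only [Bool.false_eq_true, false_iff]
    intro h
    exact (h x le_rfl hle) hmod
  | case2 x hle hmod ih =>
    intro h0
    have hT : pvTrial num x = pvTrial num (x + 1) := by rw [pvTrial]; simp [hle, hmod]
    rw [hT, ih (by omega)]
    constructor
    · intro h d hd hdd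
      rcases hd.lt_or_eq with hlt | rfl
      · exact h d (by omega) hdd
      · exact hmod
    · intro h d hd hdd
      exact h d (by omega) hdd
  | case3 x hgt =>
    intro h0
    have hT : pvTrial num x = true := by rw [pvTrial]; simp [hgt]
    rw [hT]
    simp only [true_iff]
    intro d hd hdd
    exfalso
    have : x * x ≤ d * d := mul_le_mul hd hd h0 (le_trans h0 hd)
    omega

-- the core: no divisor in [2, num) iff no divisor d with d*d ≤ num
lemma pvDivisor_sqrt (num : Int) (h2 : 2 ≤ num) :
    (∀ d : Int, 2 ≤ d → d < num → ¬ d ∣ num) ↔ (∀ d : Int, 2 ≤ d → d * d ≤ num → ¬ d ∣ num) := by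
  constructor
  · intro h d hd hdd hdvd
    have hle : d ≤ num := Int.le_of_dvd (by omega) hdvd
    have hlt : d < num := by
      rcases hle.lt_or_eq with hlt | rfl
      · exact hlt
      · nlinarith
    exact h d hd hlt hdvd
  · intro h d hd hlt hdvd
    obtain ⟨e, he⟩ := hdvd
    have hepos : 0 < e := by nlinarith
    have he2 : 2 ≤ e := by
      by_contra hcon
      have he1 : e = 1 := by omega
      subst he1
      simp at he
      omega
    rcases le_total (d * d) num with hc | hc
    · exact h d hd hc ⟨e, he⟩
    · have hed : e ≤ d := by nlinarith
      have hee : e * e ≤ num := by nlinarith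
      exact h e he2 hee ⟨d, by linarith [he, mul_comm d e]⟩

lemma pvIsPrime_eq : pvIsPrimeA = pvIsPrimeB := by
  funext num
  unfold pvIsPrimeA pvIsPrimeB
  by_cases hlt : num < 2
  · simp [hlt]
  · simp only [hlt, if_false]
    have h2 : 2 ≤ num := by omega
    rw [Bool.eq_iff_iff]
    rw [pvTrial_iff num 2 (by omega)]
    simp only [List.all_map, List.all_eq_true, PySem.List.mem_pyRange_one, Function.comp]
    constructor
    · intro h d hd hdd
      have := (pvDivisor_sqrt num h2).mp
        (fun d' hd' hlt' hdvd' => by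
          have := h d' ⟨hd', hlt'⟩
          simp only [decide_eq_true_eq] at this
          exact this ((PySem.Int.mod_eq_zero_iff_dvd num d').mpr hdvd'))
      intro hm
      exact this d hd hdd ((PySem.Int.mod_eq_zero_iff_dvd num d).mp hm)
    · intro h d hdr
      have := (pvDivisor_sqrt num h2).mpr
        (fun d' hd' hdd' hdvd' => h d' hd' hdd' ((PySem.Int.mod_eq_zero_iff_dvd num d').mpr hdvd'))
      simp only [decide_eq_true_eq]
      intro hm
      exact this d hdr.1 hdr.2 ((PySem.Int.mod_eq_zero_iff_dvd num d).mp hm)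

lemma pvInnerA_eq_find? (s : List Int) : pvInnerA s = s.find? pvIsPrimeA := by
  induction s with
  | nil => rfl
  | cons x xs ih =>
    by_cases hx : pvIsPrimeA x <;> simp [pvInnerA, List.find?, hx, ih]

lemma pvFind_eq (nested_list : List (List Int)) :
    find_first_prime nested_list = find_first_prime_alt nested_list := by
  induction nested_list with
  | nil => rfl
  | cons s rest ih =>
    unfold find_first_prime find_first_prime_alt
    rw [List.flatMap_cons, List.find?_append, pvInnerA_eq_find?, pvIsPrime_eq]
    cases hf : s.find? pvIsPrimeB with
    | some x => simp
    | none =>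
      simp only [Option.none_or]
      unfold find_first_prime_alt at ih
      exact ih

-- ===== VERDICT (by name: the statement is the Claim_ definition above) =====
theorem find_first_prime_spec : Claim_equal_find_first_prime := by
  intro nested_list _
  exact pvFind_eq nested_list
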